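-- pv_equiv track=rewrite | github.com/Gvictome/AI-Government-Assitance | app_complete_with_document_verification.py | identify_service_from_message
-- ===== SOURCE A (Python) =====
-- def identify_service_from_message(message):
--     """Identify which DMV service the user is asking about"""
--     message_lower = message.lower()
--
--     if any(word in message_lower for word in ['renew', 'renewal', 'expir']):
--         if 'license' in message_lower or 'driver' in message_lower:
--             return 'renew_license'
--     elif any(word in message_lower for word in ['first', 'new', 'learner', 'permit']):
--         if 'license' in message_lower or 'driver' in message_lower:
--             return 'new_license'
--     elif any(word in message_lower for word in ['register', 'registration']):
--         if 'vehicle' in message_lower or 'car' in message_lower: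
--             return 'register_vehicle'
--     elif any(word in message_lower for word in ['transfer', 'title', 'sell', 'buy']):
--         return 'transfer_title'
--
--     # Check for numbered selections
--     if '1' in message or 'renew driver' in message_lower:
--         return 'renew_license'
--     elif '2' in message or 'first driver' in message_lower:
--         return 'new_license'
--     elif '3' in message or 'register vehicle' in message_lower:
--         return 'register_vehicle'
--     elif '4' in message or 'transfer' in message_lower:
--         return 'transfer_title'
--
--     return None
-- ===== SOURCE B (Python) =====
-- def identify_service_from_message(message):
--     """Identify which DMV service the user is asking about.
--
--     Different strategy: one left-to-right scan of the message acts as a naive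
--     multi-pattern matcher, recording every keyword/digit that starts at each
--     position into a set; the decision is then read off that matched set."""
--     message_lower = message.lower()
--     keywords = ('renew', 'renewal', 'expir',
--                 'first', 'new', 'learner', 'permit',
--                 'register', 'registration',
--                 'transfer', 'title', 'sell', 'buy',
--                 'license', 'driver', 'vehicle', 'car',
--                 'renew driver', 'first driver', 'register vehicle')
--     found = set()
--     for i in range(len(message)):
--         for w in keywords:
--             if message_lower.startswith(w, i):
--                 found.add(w)
--         for d in '1234':
--             if message.startswith(d, i):
--                 found.add(d)
--
--     license_ok = 'license' in found or 'driver' in found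
--     group = None
--     for g, triggers in enumerate((('renew', 'renewal', 'expir'),
--                                   ('first', 'new', 'learner', 'permit'),
--                                   ('register', 'registration'),
--                                   ('transfer', 'title', 'sell', 'buy'))):
--         if any(t in found for t in triggers):
--             group = g
--             break
--     if group == 0 and license_ok:
--         return 'renew_license'
--     if group == 1 and license_ok:
--         return 'new_license'
--     if group == 2 and ('vehicle' in found or 'car' in found):
--         return 'register_vehicle'
--     if group == 3:
--         return 'transfer_title'
--
--     if '1' in found or 'renew driver' in found:
--         return 'renew_license'
--     if '2' in found or 'first driver' in found:
--         return 'new_license'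
--     if '3' in found or 'register vehicle' in found:
--         return 'register_vehicle'
--     if '4' in found or 'transfer' in found:
--         return 'transfer_title'
--     return None
-- ===== Notes on version B (the rewrite author's own statement) =====
-- stated objective: alternative
-- what changed: Instead of wiring ~24 separate Python substring-membership tests into two if/elif chains as A does, B makes a single left-to-right scan of the message (a naive multi-pattern matcher) that collects every keyword/digit starting at each position into a set, then reads the decision off that matched set (first fired trigger group via enumerate, then the menu checks).
import Mathlib
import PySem

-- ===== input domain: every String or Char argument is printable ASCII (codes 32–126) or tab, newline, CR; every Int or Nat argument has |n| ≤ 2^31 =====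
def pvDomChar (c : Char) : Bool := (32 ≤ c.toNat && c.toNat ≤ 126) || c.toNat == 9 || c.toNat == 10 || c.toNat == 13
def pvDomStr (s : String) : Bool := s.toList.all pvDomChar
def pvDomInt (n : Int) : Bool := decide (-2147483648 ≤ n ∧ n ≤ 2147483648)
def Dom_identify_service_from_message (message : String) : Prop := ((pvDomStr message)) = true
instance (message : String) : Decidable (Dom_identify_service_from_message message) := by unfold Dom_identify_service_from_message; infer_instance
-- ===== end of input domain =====

-- B replaces the repeated 'in' substring checks by ONE position scan collecting the matched keywords into a set, then decides from that set (objective: alternative, same behaviour).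

-- ===== PORT A =====
-- A's "numbered selections" if/elif block (the code after the first chain).
def identify_service_phase2 (message ml : String) : Option String :=
  if PySem.Str.isIn "1" message || PySem.Str.isIn "renew driver" ml then some "renew_license"
  else if PySem.Str.isIn "2" message || PySem.Str.isIn "first driver" ml then some "new_license"
  else if PySem.Str.isIn "3" message || PySem.Str.isIn "register vehicle" ml then some "register_vehicle"
  else if PySem.Str.isIn "4" message || PySem.Str.isIn "transfer" ml then some "transfer_title"
  else none

-- Literal transliteration of A's if/elif chains.
def identify_service_from_message (message : String) : Option String :=
  let ml := PySem.Str.lower message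
  if PySem.Str.isIn "renew" ml || PySem.Str.isIn "renewal" ml || PySem.Str.isIn "expir" ml then
    if PySem.Str.isIn "license" ml || PySem.Str.isIn "driver" ml then
      some "renew_license"
    else identify_service_phase2 message ml
  else if PySem.Str.isIn "first" ml || PySem.Str.isIn "new" ml || PySem.Str.isIn "learner" ml || PySem.Str.isIn "permit" ml then
    if PySem.Str.isIn "license" ml || PySem.Str.isIn "driver" ml then
      some "new_license"
    else identify_service_phase2 message ml
  else if PySem.Str.isIn "register" ml || PySem.Str.isIn "registration" ml then
    if PySem.Str.isIn "vehicle" ml || PySem.Str.isIn "car" ml then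
      some "register_vehicle"
    else identify_service_phase2 message ml
  else if PySem.Str.isIn "transfer" ml || PySem.Str.isIn "title" ml || PySem.Str.isIn "sell" ml || PySem.Str.isIn "buy" ml then
    some "transfer_title"
  else identify_service_phase2 message ml

-- ===== PORT B =====
-- Python: message_lower.startswith(w, i)  (0 ≤ i; exact — startswith with a start clamps like a slice, = startswith on drop i)
def pvStartsAt (l w : List Char) (i : Nat) : Bool := PySem.Chars.startswith (l.drop i) w

def pvKeywords : List (List Char) :=
  ["renew".toList, "renewal".toList, "expir".toList,
   "first".toList, "new".toList, "learner".toList, "permit".toList,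
   "register".toList, "registration".toList,
   "transfer".toList, "title".toList, "sell".toList, "buy".toList,
   "license".toList, "driver".toList, "vehicle".toList, "car".toList,
   "renew driver".toList, "first driver".toList, "register vehicle".toList]

def pvDigits : List (List Char) := ["1".toList, "2".toList, "3".toList, "4".toList]

-- the body of B's scan loop at position i
def pvInner (ml raw : List Char) (i : Nat) (s : PySem.Set (List Char)) : PySem.Set (List Char) :=
  pvDigits.foldl (fun s d => if pvStartsAt raw d i then PySem.Set.add s d else s)
    (pvKeywords.foldl (fun s w => if pvStartsAt ml w i then PySem.Set.add s w else s) s)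

-- B's single position scan gathering the matched patterns
def pvScan (ml raw : List Char) : PySem.Set (List Char) :=
  (List.range raw.length).foldl (fun s i => pvInner ml raw i s) PySem.Set.empty

-- B's first-matching trigger group (enumerate + break)
def pvFirstGroup (found : PySem.Set (List Char)) : List (List (List Char)) → Nat → Option Nat
  | [], _ => none
  | g :: rest, n =>
    if g.any (fun w => PySem.Set.contains found w) then some n
    else pvFirstGroup found rest (n + 1)

def identify_service_from_message_alt (message : String) : Option String :=
  let ml := (PySem.Str.lower message).toList
  let raw := message.toList
  let found := pvScan ml raw
  let licenseOk := PySem.Set.contains found "license".toList || PySem.Set.contains found "driver".toList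
  let group := pvFirstGroup found
    [["renew".toList, "renewal".toList, "expir".toList],
     ["first".toList, "new".toList, "learner".toList, "permit".toList],
     ["register".toList, "registration".toList],
     ["transfer".toList, "title".toList, "sell".toList, "buy".toList]] 0
  if group == some 0 && licenseOk then some "renew_license"
  else if group == some 1 && licenseOk then some "new_license"
  else if group == some 2 && (PySem.Set.contains found "vehicle".toList || PySem.Set.contains found "car".toList) then some "register_vehicle"
  else if group == some 3 then some "transfer_title"
  else if PySem.Set.contains found "1".toList || PySem.Set.contains found "renew driver".toList then some "renew_license"
  else if PySem.Set.contains found "2".toList || PySem.Set.contains found "first driver".toList then some "new_license"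
  else if PySem.Set.contains found "3".toList || PySem.Set.contains found "register vehicle".toList then some "register_vehicle"
  else if PySem.Set.contains found "4".toList || PySem.Set.contains found "transfer".toList then some "transfer_title"
  else none

-- ===== PRECONDITION & SPEC =====
def Spec_identify_service_from_message (message : String) (out : Option String) : Prop := out = identify_service_from_message_alt message
instance (message : String) (out : Option String) : Decidable (Spec_identify_service_from_message message out) := by unfold Spec_identify_service_from_message; infer_instance

-- ===== CLAIM (what is proved, stated in full; the proofs are below) =====
def Claim_equal_identify_service_from_message : Prop := ∀ (message : String), Dom_identify_service_from_message message → Spec_identify_service_from_message message (identify_service_from_message message)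

-- ===== LEMMAS AND PROOFS =====

-- membership in a filtered fold of Set.add
lemma pv_mem_foldl_add_if {p : List Char → Bool} :
    ∀ (L : List (List Char)) (s : PySem.Set (List Char)) (x : List Char),
      (x ∈ L.foldl (fun s w => if p w then PySem.Set.add s w else s) s) ↔
        x ∈ s ∨ (x ∈ L ∧ p x = true) := by
  intro L
  induction L with
  | nil => simp
  | cons w rest ih =>
    intro s x
    simp only [List.foldl_cons, ih, List.mem_cons]
    by_cases hw : p w = true
    · rw [if_pos hw, PySem.Set.mem_add]
      constructor
      · rintro (⟨h | h⟩ | h)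
        · exact Or.inl h
        · subst h; exact Or.inr ⟨Or.inl rfl, hw⟩
        · exact Or.inr ⟨Or.inr h.1, h.2⟩
      · rintro (h | ⟨h1 | h1, h2⟩)
        · exact Or.inl (Or.inl h)
        · subst h1; exact Or.inl (Or.inr rfl)
        · exact Or.inr ⟨h1, h2⟩
    · rw [if_neg hw]
      constructor
      · rintro (h | h)
        · exact Or.inl h
        · exact Or.inr ⟨Or.inr h.1, h.2⟩
      · rintro (h | ⟨h1 | h1, h2⟩)
        · exact Or.inl h
        · subst h1; exact absurd h2 (by simp [hw])
        · exact Or.inr ⟨h1, h2⟩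

lemma pv_mem_inner (ml raw : List Char) (i : Nat) (s : PySem.Set (List Char)) (x : List Char) :
    x ∈ pvInner ml raw i s ↔
      x ∈ s ∨ (x ∈ pvKeywords ∧ pvStartsAt ml x i = true) ∨ (x ∈ pvDigits ∧ pvStartsAt raw x i = true) := by
  unfold pvInner
  rw [pv_mem_foldl_add_if, pv_mem_foldl_add_if]
  tauto

lemma pv_mem_scan_aux (ml raw : List Char) :
    ∀ (L : List Nat) (s : PySem.Set (List Char)) (x : List Char),
      (x ∈ L.foldl (fun s i => pvInner ml raw i s) s) ↔
        x ∈ s ∨ ∃ i ∈ L,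
          (x ∈ pvKeywords ∧ pvStartsAt ml x i = true) ∨ (x ∈ pvDigits ∧ pvStartsAt raw x i = true) := by
  intro L
  induction L with
  | nil => simp
  | cons j rest ih =>
    intro s x
    simp only [List.foldl_cons, ih, pv_mem_inner, List.mem_cons]
    constructor
    · rintro ((h | h) | ⟨i, hi, h⟩)
      · exact Or.inl h
      · exact Or.inr ⟨j, Or.inl rfl, h⟩
      · exact Or.inr ⟨i, Or.inr hi, h⟩
    · rintro (h | ⟨i, hi | hi, h⟩)
      · exact Or.inl (Or.inl h)
      · subst hi; exact Or.inl (Or.inr h)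
      · exact Or.inr ⟨i, hi, h⟩

lemma pv_mem_scan (ml raw : List Char) (x : List Char) :
    x ∈ pvScan ml raw ↔
      ∃ i ∈ List.range raw.length,
        (x ∈ pvKeywords ∧ pvStartsAt ml x i = true) ∨ (x ∈ pvDigits ∧ pvStartsAt raw x i = true) := by
  unfold pvScan
  rw [pv_mem_scan_aux]
  simp [PySem.Set.empty]

-- a bounded position scan for a nonempty pattern is Python's 'sub in s'
lemma pv_exists_startsAt_iff (w l : List Char) (hw : w ≠ []) :
    (∃ i ∈ List.range l.length, pvStartsAt l w i = true) ↔ PySem.Chars.isIn w l = true := by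
  rw [← PySem.Chars.exists_prefix_drop_iff_isIn]
  constructor
  · rintro ⟨i, _, h⟩
    exact ⟨i, (PySem.Chars.startswith_iff _ _).mp h⟩
  · rintro ⟨j, hj⟩
    refine ⟨j, ?_, (PySem.Chars.startswith_iff _ _).mpr hj⟩
    rw [List.mem_range]
    by_contra hlen
    have : l.drop j = [] := List.drop_eq_nil_of_le (by omega)
    rw [this, List.prefix_nil] at hj
    exact hw hj

lemma pv_scan_keyword (ml raw : List Char) (hlen : ml.length = raw.length)
    (w : List Char) (hw : w ≠ []) (h1 : w ∈ pvKeywords) (h2 : w ∉ pvDigits) :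
    PySem.Set.contains (pvScan ml raw) w = PySem.Chars.isIn w ml := by
  rcases hb : PySem.Chars.isIn w ml with _ | _
  · rw [Bool.eq_false_iff, Ne, PySem.Set.contains_iff, pv_mem_scan]
    rintro ⟨i, hi, ⟨_, hs⟩ | ⟨hd, _⟩⟩
    · rw [← hlen] at hi
      have := (pv_exists_startsAt_iff w ml hw).mp ⟨i, hi, hs⟩
      rw [hb] at this; cases this
    · exact h2 hd
  · rw [PySem.Set.contains_iff, pv_mem_scan]
    obtain ⟨i, hi, hs⟩ := (pv_exists_startsAt_iff w ml hw).mpr hb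
    rw [hlen] at hi
    exact ⟨i, hi, Or.inl ⟨h1, hs⟩⟩

lemma pv_scan_digit (ml raw : List Char) (d : List Char) (hd : d ≠ [])
    (h1 : d ∈ pvDigits) (h2 : d ∉ pvKeywords) :
    PySem.Set.contains (pvScan ml raw) d = PySem.Chars.isIn d raw := by
  rcases hb : PySem.Chars.isIn d raw with _ | _
  · rw [Bool.eq_false_iff, Ne, PySem.Set.contains_iff, pv_mem_scan]
    rintro ⟨i, hi, ⟨hk, _⟩ | ⟨_, hs⟩⟩
    · exact h2 hk
    · have := (pv_exists_startsAt_iff d raw hd).mp ⟨i, hi, hs⟩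
      rw [hb] at this; cases this
  · rw [PySem.Set.contains_iff, pv_mem_scan]
    obtain ⟨i, hi, hs⟩ := (pv_exists_startsAt_iff d raw hd).mpr hb
    exact ⟨i, hi, Or.inr ⟨h1, hs⟩⟩

lemma pv_lower_length (l : List Char) : (PySem.Chars.lower l).length = l.length := by
  simp [PySem.Chars.lower]

set_option maxHeartbeats 1000000 in
-- ===== VERDICT (by name: the statement is the Claim_ definition above) =====
theorem identify_service_from_message_spec : Claim_equal_identify_service_from_message := by
  intro message _
  unfold Spec_identify_service_from_message
  unfold identify_service_from_message identify_service_from_message_alt identify_service_phase2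
  have hlen : (PySem.Str.lower message).toList.length = message.toList.length := by
    rw [PySem.Str.toList_lower]; exact pv_lower_length _
  have hkw : ∀ s : String, s.toList ≠ [] → s.toList ∈ pvKeywords → s.toList ∉ pvDigits →
      PySem.Set.contains (pvScan (PySem.Str.lower message).toList message.toList) s.toList
        = PySem.Str.isIn s (PySem.Str.lower message) := by
    intro s hw h1 h2
    rw [pv_scan_keyword _ _ hlen s.toList hw h1 h2, PySem.Str.isIn_eq]
  have hdg : ∀ s : String, s.toList ≠ [] → s.toList ∈ pvDigits → s.toList ∉ pvKeywords →
      PySem.Set.contains (pvScan (PySem.Str.lower message).toList message.toList) s.toList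
        = PySem.Str.isIn s message := by
    intro s hd h1 h2
    rw [pv_scan_digit _ _ s.toList hd h1 h2, PySem.Str.isIn_eq]
  simp only [pvFirstGroup, List.any_cons, List.any_nil, Bool.or_false]
  rw [hkw "renew" (by decide) (by decide) (by decide),
      hkw "renewal" (by decide) (by decide) (by decide),
      hkw "expir" (by decide) (by decide) (by decide),
      hkw "first" (by decide) (by decide) (by decide),
      hkw "new" (by decide) (by decide) (by decide),
      hkw "learner" (by decide) (by decide) (by decide),
      hkw "permit" (by decide) (by decide) (by decide),
      hkw "register" (by decide) (by decide) (by decide),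
      hkw "registration" (by decide) (by decide) (by decide),
      hkw "transfer" (by decide) (by decide) (by decide),
      hkw "title" (by decide) (by decide) (by decide),
      hkw "sell" (by decide) (by decide) (by decide),
      hkw "buy" (by decide) (by decide) (by decide),
      hkw "license" (by decide) (by decide) (by decide),
      hkw "driver" (by decide) (by decide) (by decide),
      hkw "vehicle" (by decide) (by decide) (by decide),
      hkw "car" (by decide) (by decide) (by decide),
      hkw "renew driver" (by decide) (by decide) (by decide),
      hkw "first driver" (by decide) (by decide) (by decide),
      hkw "register vehicle" (by decide) (by decide) (by decide),
      hdg "1" (by decide) (by decide) (by decide),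
      hdg "2" (by decide) (by decide) (by decide),
      hdg "3" (by decide) (by decide) (by decide),
      hdg "4" (by decide) (by decide) (by decide)]
  simp only [Bool.or_assoc]
  generalize (PySem.Str.isIn "renew" (PySem.Str.lower message) ||
      (PySem.Str.isIn "renewal" (PySem.Str.lower message) ||
        PySem.Str.isIn "expir" (PySem.Str.lower message))) = g1
  generalize (PySem.Str.isIn "first" (PySem.Str.lower message) ||
      (PySem.Str.isIn "new" (PySem.Str.lower message) ||
        (PySem.Str.isIn "learner" (PySem.Str.lower message) ||
          PySem.Str.isIn "permit" (PySem.Str.lower message)))) = g2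
  generalize (PySem.Str.isIn "register" (PySem.Str.lower message) ||
      PySem.Str.isIn "registration" (PySem.Str.lower message)) = g3
  generalize (PySem.Str.isIn "transfer" (PySem.Str.lower message) ||
      (PySem.Str.isIn "title" (PySem.Str.lower message) ||
        (PySem.Str.isIn "sell" (PySem.Str.lower message) ||
          PySem.Str.isIn "buy" (PySem.Str.lower message)))) = g4
  generalize (PySem.Str.isIn "license" (PySem.Str.lower message) ||
      PySem.Str.isIn "driver" (PySem.Str.lower message)) = c1
  generalize (PySem.Str.isIn "vehicle" (PySem.Str.lower message) ||
      PySem.Str.isIn "car" (PySem.Str.lower message)) = c3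
  generalize (PySem.Str.isIn "1" message ||
      PySem.Str.isIn "renew driver" (PySem.Str.lower message)) = m1
  generalize (PySem.Str.isIn "2" message ||
      PySem.Str.isIn "first driver" (PySem.Str.lower message)) = m2
  generalize (PySem.Str.isIn "3" message ||
      PySem.Str.isIn "register vehicle" (PySem.Str.lower message)) = m3
  generalize (PySem.Str.isIn "4" message ||
      PySem.Str.isIn "transfer" (PySem.Str.lower message)) = m4
  revert g1 g2 g3 g4 c1 c3 m1 m2 m3 m4
  decide
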